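-- pv_equiv track=rewrite | github.com/kindship-ai/firecrawl-cli | pycli/formatters.py | extract_main_content
-- ===== SOURCE A (Python) =====
-- def extract_main_content(content: str) -> str:
--     """Extract the main article content from markdown"""
--     lines = content.split("\n")
--     content_lines = []
--     in_content = False
--
--     for line in lines:
--         # Start capturing at first heading
--         if line.startswith("#"):
--             in_content = True
--
--         if in_content:
--             content_lines.append(line)
--
--     return "\n".join(content_lines).strip()
-- ===== SOURCE B (Python) =====
-- def extract_main_content(content: str) -> str:
--     """Extract the main article content from markdown"""
--     at_line_start = True
--     for i, ch in enumerate(content):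
--         if at_line_start and ch == "#":
--             return content[i:].strip()
--         at_line_start = ch == "\n"
--     return ""
-- ===== Notes on version B (the rewrite author's own statement) =====
-- stated objective: alternative
-- what changed: B never splits the text into lines: it scans raw characters once with an at-line-start flag and returns content[i:].strip() at the first '#' that begins a line, replacing A's split/flag/append/join pipeline over a list of lines.
import Mathlib
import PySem

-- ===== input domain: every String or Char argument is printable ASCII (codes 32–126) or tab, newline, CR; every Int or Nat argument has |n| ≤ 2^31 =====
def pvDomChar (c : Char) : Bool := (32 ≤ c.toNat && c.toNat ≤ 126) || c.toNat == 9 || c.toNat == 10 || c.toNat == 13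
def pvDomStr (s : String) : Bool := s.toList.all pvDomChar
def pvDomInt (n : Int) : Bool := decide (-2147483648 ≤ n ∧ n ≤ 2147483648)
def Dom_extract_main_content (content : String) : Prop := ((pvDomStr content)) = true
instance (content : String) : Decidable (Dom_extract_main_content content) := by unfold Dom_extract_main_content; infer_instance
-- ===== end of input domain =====

-- B replaces A's split-into-lines/flag/append/join pipeline with a single raw-character scan
-- carrying an at-line-start flag (objective: alternative).

-- ===== PORT A =====
-- one loop iteration of A: latch the flag on a heading line, append when latched
def pvStepA (st : List (List Char) × Bool) (line : List Char) : List (List Char) × Bool :=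
  let inContent := st.2 || PySem.Chars.startswith line ['#']
  (if inContent then st.1 ++ [line] else st.1, inContent)

def extract_main_content (content : String) : String :=
  let lines := PySem.Chars.splitOn content.toList ['\n']
  let st := lines.foldl pvStepA ([], false)
  String.ofList (PySem.Chars.strip (PySem.Chars.join ['\n'] st.1))

-- ===== PORT B =====
-- B's for-loop over the characters: the recursion keeps the current suffix (= content[i:])
-- and the at-line-start flag; at the first '#' beginning a line it returns that suffix stripped
def pvScan : List Char → Bool → List Char
  | [], _ => []
  | c :: rest, atStart =>
    if atStart && c == '#' then PySem.Chars.strip (c :: rest)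
    else pvScan rest (c == '\n')

def extract_main_content_alt (content : String) : String :=
  String.ofList (pvScan content.toList true)

-- ===== PRECONDITION & SPEC =====
def Spec_extract_main_content (content : String) (out : String) : Prop := out = extract_main_content_alt content
instance (content : String) (out : String) : Decidable (Spec_extract_main_content content out) := by unfold Spec_extract_main_content; infer_instance

-- ===== CLAIM (what is proved, stated in full; the proofs are below) =====
def Claim_equal_extract_main_content : Prop := ∀ (content : String), Dom_extract_main_content content → Spec_extract_main_content content (extract_main_content content)

-- ===== LEMMAS AND PROOFS =====

-- proof model of split("\n"): structural recursion, prepending onto the head line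
def pvPre (a : List Char) : List (List Char) → List (List Char)
  | [] => [a]
  | h :: t => (a ++ h) :: t

def pvSplitNL : List Char → List (List Char)
  | [] => [[]]
  | c :: rest => if c = '\n' then [] :: pvSplitNL rest else pvPre [c] (pvSplitNL rest)

theorem pvSplitNL_ne_nil (cs : List Char) : pvSplitNL cs ≠ [] := by
  cases cs with
  | nil => simp [pvSplitNL]
  | cons c rest =>
    simp only [pvSplitNL]
    split
    · simp
    · cases h : pvSplitNL rest <;> simp [pvPre]

theorem pvPre_nil (r : List (List Char)) (h : r ≠ []) : pvPre [] r = r := by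
  cases r with
  | nil => exact absurd rfl h
  | cons a t => simp [pvPre]

theorem pvPre_pvPre (a b : List Char) (r : List (List Char)) :
    pvPre a (pvPre b r) = pvPre (a ++ b) r := by
  cases r <;> simp [pvPre]

-- PySem's splitOn on a single-newline separator computes pvSplitNL
theorem pv_go_eq (fuel : Nat) (l cur : List Char) (acc : List (List Char)) (h : l.length < fuel) :
    PySem.Chars.splitOn.go ['\n'] fuel l cur acc = acc.reverse ++ pvPre cur.reverse (pvSplitNL l) := by
  induction fuel generalizing l cur acc with
  | zero => omega
  | succ f ih =>
    cases l with
    | nil => simp [PySem.Chars.splitOn.go, pvSplitNL, pvPre]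
    | cons c rest =>
      by_cases hc : c = '\n'
      · subst hc
        rw [show PySem.Chars.splitOn.go ['\n'] (f+1) ('\n' :: rest) cur acc
              = PySem.Chars.splitOn.go ['\n'] f rest [] (cur.reverse :: acc) from by
            simp [PySem.Chars.splitOn.go, List.isPrefixOf]]
        rw [ih rest [] (cur.reverse :: acc) (by simpa using Nat.lt_of_succ_lt_succ h)]
        rw [List.reverse_nil, pvPre_nil _ (pvSplitNL_ne_nil rest)]
        simp [pvSplitNL, pvPre]
      · rw [show PySem.Chars.splitOn.go ['\n'] (f+1) (c :: rest) cur acc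
              = PySem.Chars.splitOn.go ['\n'] f rest (c :: cur) acc from by
            simp only [PySem.Chars.splitOn.go, List.isPrefixOf]
            split
            · next hp => simp at hp; exact absurd hp.symm hc
            · rfl]
        rw [ih rest (c :: cur) acc (by simpa using Nat.lt_of_succ_lt_succ h)]
        simp [pvSplitNL, hc, ← pvPre_pvPre]

theorem pv_splitOn_eq (cs : List Char) :
    PySem.Chars.splitOn cs ['\n'] = pvSplitNL cs := by
  unfold PySem.Chars.splitOn
  rw [pv_go_eq _ _ _ _ (by omega)]
  simp [pvPre_nil _ (pvSplitNL_ne_nil cs)]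

-- joining the model's lines with '\n' recovers the original characters
theorem pv_flatten_intersperse_cons (c : Char) (a : List Char) (t : List (List Char)) :
    (List.intersperse ['\n'] ((c :: a) :: t)).flatten = c :: (List.intersperse ['\n'] (a :: t)).flatten := by
  cases t <;> simp [List.intersperse]

theorem pv_join_splitNL (cs : List Char) :
    PySem.Chars.join ['\n'] (pvSplitNL cs) = cs := by
  induction cs with
  | nil => decide
  | cons c rest ih =>
    by_cases hc : c = '\n'
    · subst hc
      cases h : pvSplitNL rest with
      | nil => exact absurd h (pvSplitNL_ne_nil rest)
      | cons a t =>
        simp only [pvSplitNL, if_pos rfl, h]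
        rw [h] at ih
        simpa [PySem.Chars.join, List.intercalate, List.intersperse] using ih
    · cases h : pvSplitNL rest with
      | nil => exact absurd h (pvSplitNL_ne_nil rest)
      | cons a t =>
        simp only [pvSplitNL, if_neg hc, h, pvPre, List.singleton_append]
        rw [h] at ih
        simp only [PySem.Chars.join, List.intercalate] at ih ⊢
        rw [pv_flatten_intersperse_cons, ih]

-- line-level characterisation shared by both proofs: result from the first '#'-line onward
def pvF : List (List Char) → List Char
  | [] => []
  | l :: rest =>
    if PySem.Chars.startswith l ['#'] then PySem.Chars.strip (PySem.Chars.join ['\n'] (l :: rest))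
    else pvF rest

-- once A's flag is set, the loop appends every remaining line
theorem pv_loop_flag_true (ls : List (List Char)) (acc : List (List Char)) :
    ls.foldl pvStepA (acc, true) = (acc ++ ls, true) := by
  induction ls generalizing acc with
  | nil => simp
  | cons l rest ih =>
    rw [List.foldl_cons, show pvStepA (acc, true) l = (acc ++ [l], true) from by simp [pvStepA], ih]
    simp

-- A's loop computes exactly the line-level characterisation
theorem pv_loop_eq_F (ls : List (List Char)) :
    PySem.Chars.strip (PySem.Chars.join ['\n'] (ls.foldl pvStepA ([], false)).1) = pvF ls := by
  induction ls with
  | nil => decide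
  | cons l rest ih =>
    by_cases h : PySem.Chars.startswith l ['#'] = true
    · rw [List.foldl_cons, show pvStepA ([], false) l = ([l], true) from by simp [pvStepA, h],
        pv_loop_flag_true, pvF]
      simp [h]
    · rw [List.foldl_cons, show pvStepA ([], false) l = ([], false) from by simp [pvStepA, h], pvF]
      simp only [h, if_false, Bool.false_eq_true]
      exact ih

-- B's character scan computes the same characterisation of the line model
theorem pv_scan_eq_F (cs : List Char) :
    pvScan cs true = pvF (pvSplitNL cs) ∧ pvScan cs false = pvF (pvSplitNL cs).tail := by
  induction cs with
  | nil => constructor <;> decide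
  | cons c rest ih =>
    refine ⟨?_, ?_⟩
    · by_cases hh : c = '#'
      · subst hh
        cases h : pvSplitNL rest with
        | nil => exact absurd h (pvSplitNL_ne_nil rest)
        | cons a t =>
          have hs : pvSplitNL ('#' :: rest) = ('#' :: a) :: t := by simp [pvSplitNL, h, pvPre]
          have hj := pv_join_splitNL ('#' :: rest)
          rw [hs] at hj
          rw [hs]
          simp [pvScan, pvF, PySem.Chars.startswith, List.isPrefixOf, hj]
      · by_cases hn : c = '\n'
        · subst hn
          simp only [pvScan, pvSplitNL, if_pos rfl]
          simpa [pvF, PySem.Chars.startswith, List.isPrefixOf] using ih.1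
        · cases h : pvSplitNL rest with
          | nil => exact absurd h (pvSplitNL_ne_nil rest)
          | cons a t =>
            have hs : pvSplitNL (c :: rest) = (c :: a) :: t := by simp [pvSplitNL, hn, h, pvPre]
            rw [hs]
            have h2 := ih.2
            rw [h] at h2
            simpa [pvScan, pvF, PySem.Chars.startswith, List.isPrefixOf,
              if_neg (show ¬ ('#' = c) from fun e => hh e.symm),
              show (c == '#') = false from by simpa using hh,
              show (c == '\n') = false from by simpa using hn] using h2
    · by_cases hn : c = '\n'
      · subst hn
        simp only [pvScan, pvSplitNL, if_pos rfl, List.tail_cons]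
        simpa using ih.1
      · cases h : pvSplitNL rest with
        | nil => exact absurd h (pvSplitNL_ne_nil rest)
        | cons a t =>
          have hs : pvSplitNL (c :: rest) = (c :: a) :: t := by simp [pvSplitNL, hn, h, pvPre]
          rw [hs]
          have h2 := ih.2
          rw [h] at h2
          simpa [pvScan, show (c == '\n') = false from by simpa using hn] using h2

-- ===== VERDICT (by name: the statement is the Claim_ definition above) =====
theorem extract_main_content_spec : Claim_equal_extract_main_content := by
  intro content _
  show extract_main_content content = extract_main_content_alt content
  show String.ofList (PySem.Chars.strip (PySem.Chars.join ['\n']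
      (List.foldl pvStepA ([], false) (PySem.Chars.splitOn content.toList ['\n'])).1))
    = String.ofList (pvScan content.toList true)
  rw [pv_splitOn_eq, pv_loop_eq_F, (pv_scan_eq_F content.toList).1]
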